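-- pv_equiv track=rewrite | github.com/BigML-CS-UCLA/GRADMM | gradmm/filtering.py | interleave_label
-- ===== SOURCE A (Python) =====
-- from collections import defaultdict
--
-- def interleave_label(list_sample):
--     """Assume only 2 different labels."""
--     grouped_samples = defaultdict(list)
--     for sample in list_sample:
--         grouped_samples[sample['label']].append(sample)
--
--     # Count
--     labels = list(grouped_samples.keys())
--     count_label0 = len(grouped_samples[labels[0]])
--     count_label1 = len(grouped_samples[labels[1]])
--     total_count = count_label0 + count_label1
--     min_count = min(count_label0, count_label1)
--     pivot_idx = 2 * min_count
--     mixed_samples = [None for _ in range(total_count)]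
--
--     # Mix samples
--     mixed_samples[:pivot_idx:2] = grouped_samples[labels[0]][:min_count]
--     mixed_samples[1:pivot_idx:2] = grouped_samples[labels[1]][:min_count]
--     # Handle imbalance case
--     remaining = grouped_samples[labels[0]][min_count:] + grouped_samples[labels[1]][min_count:]
--     mixed_samples[pivot_idx:] = remaining
--
--     return mixed_samples
-- ===== SOURCE B (Python) =====
-- from collections import defaultdict
--
-- def interleave_label(list_sample):
--     """Assume only 2 different labels."""
--     grouped_samples = defaultdict(list)
--     for sample in list_sample:
--         grouped_samples[sample['label']].append(sample)
--
--     labels = list(grouped_samples.keys())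
--     g0 = grouped_samples[labels[0]]
--     g1 = grouped_samples[labels[1]]
--     min_count = min(len(g0), len(g1))
--
--     result = []
--     for a, b in zip(g0, g1):
--         result.append(a)
--         result.append(b)
--     result.extend(g0[min_count:])
--     result.extend(g1[min_count:])
--     return result
-- ===== Notes on version B (the rewrite author's own statement) =====
-- stated objective: simpler
-- what changed: Replaces A's preallocated None-filled list with strided slice assignments (mixed[:p:2], mixed[1:p:2], mixed[p:]) by a direct zip-loop that appends pairs and then extends with each group's leftover tail.
import Mathlib
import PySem

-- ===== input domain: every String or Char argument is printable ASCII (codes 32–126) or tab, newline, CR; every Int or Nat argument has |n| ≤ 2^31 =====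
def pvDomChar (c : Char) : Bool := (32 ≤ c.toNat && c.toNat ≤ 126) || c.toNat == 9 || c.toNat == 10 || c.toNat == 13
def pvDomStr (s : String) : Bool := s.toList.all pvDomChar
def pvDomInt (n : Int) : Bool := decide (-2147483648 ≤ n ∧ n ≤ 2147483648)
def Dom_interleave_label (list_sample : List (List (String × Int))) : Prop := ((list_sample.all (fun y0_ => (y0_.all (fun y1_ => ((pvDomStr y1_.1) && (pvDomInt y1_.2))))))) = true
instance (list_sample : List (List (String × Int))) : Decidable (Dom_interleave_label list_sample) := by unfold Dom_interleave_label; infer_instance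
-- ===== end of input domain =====

-- B differs from A only in how the result is assembled (zip-loop + extends instead of a
-- preallocated list filled by strided slice assignment); the grouping prelude is shared.

-- sample['label'] : first match in the sample dict; Pre_ guarantees the key is present
-- (Python raises KeyError otherwise), so the default 0 is never the value used.
def pvLabelOf (s : List (String × Int)) : Int := (PySem.Dict.mk s).getD "label" 0

-- Shared prelude of BOTH Pythons (identical lines in Source A and Source B): group by label,
-- labels = list(keys), g0/g1 = the first two groups. labels[0]/labels[1] raise IndexError
-- when out of range (Pre_ excludes that), so the .getD 0 defaults are never reached on Pre_.
def pvGroups (list_sample : List (List (String × Int))) :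
    List (List (String × Int)) × List (List (String × Int)) :=
  let grouped := list_sample.foldl
    (fun d s => d.modify (pvLabelOf s) [] (fun g => g ++ [s])) PySem.Dict.empty
  let labels := grouped.keys
  let l0 := (PySem.List.pyGet? labels 0).getD 0
  let l1 := (PySem.List.pyGet? labels 1).getD 0
  (grouped.getD l0 [], grouped.getD l1 [])

-- ===== PORT A =====
-- Hand port of the strided slice assignment l[0:2*|vs|:2] = vs (step 2, start 0);
-- exact because Python's extended-slice assignment requires exactly |vs| targets,
-- which A's index arithmetic guarantees.
def assignEven {α : Type} : List (Option α) → List α → List (Option α)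
  | l, [] => l
  | [], _ :: _ => []
  | [_], v :: _ => [some v]
  | _ :: y :: rest, v :: vs => some v :: y :: assignEven rest vs

-- Hand port of l[1:1+2*|vs|:2] = vs (step 2, start 1): keep the head, stride from index 1.
def assignOdd {α : Type} : List (Option α) → List α → List (Option α)
  | [], _ => []
  | x :: rest, vs => x :: assignEven rest vs

def interleave_label (list_sample : List (List (String × Int))) : List (List (String × Int)) :=
  let g := pvGroups list_sample
  let g0 := g.1
  let g1 := g.2
  let count_label0 := g0.length
  let count_label1 := g1.length
  let total_count := count_label0 + count_label1
  let min_count := min count_label0 count_label1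
  let pivot_idx := 2 * min_count
  let mixed0 : List (Option (List (String × Int))) := List.replicate total_count none
  let mixed1 := assignEven mixed0 (g0.take min_count)
  let mixed2 := assignOdd mixed1 (g1.take min_count)
  let remaining := g0.drop min_count ++ g1.drop min_count
  -- mixed[pivot:] = remaining (|remaining| = total - pivot, so lengths agree)
  let mixed3 := mixed2.take pivot_idx ++ remaining.map some
  -- every slot was assigned, so extracting with .getD [] is exact
  mixed3.map (fun o => o.getD [])

-- ===== PORT B =====
def interleave_label_alt (list_sample : List (List (String × Int))) : List (List (String × Int)) :=
  let g := pvGroups list_sample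
  let g0 := g.1
  let g1 := g.2
  let min_count := min g0.length g1.length
  let result := (g0.zip g1).foldl (fun acc p => acc ++ [p.1, p.2]) []
  result ++ g0.drop min_count ++ g1.drop min_count

-- ===== PRECONDITION & SPEC =====
-- Pre_ = exactly where the Python A returns: every sample has the key 'label'
-- (else KeyError) and at least two distinct labels occur (else labels[1] → IndexError).
def Pre_interleave_label (list_sample : List (List (String × Int))) : Prop :=
  (∀ s ∈ list_sample, "label" ∈ s.map Prod.fst) ∧
  2 ≤ (list_sample.map pvLabelOf).dedup.length
instance (list_sample : List (List (String × Int))) : Decidable (Pre_interleave_label list_sample) := by unfold Pre_interleave_label; infer_instance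

def pvWitness_interleave_label : (List (List (String × Int))) :=
  [[("label", 0)], [("label", 1)]]

def Spec_interleave_label (list_sample : List (List (String × Int))) (out : List (List (String × Int))) : Prop := out = interleave_label_alt list_sample
instance (list_sample : List (List (String × Int))) (out : List (List (String × Int))) : Decidable (Spec_interleave_label list_sample out) := by unfold Spec_interleave_label; infer_instance

-- ===== CLAIM (what is proved, stated in full; the proofs are below) =====
def Claim_equal_interleave_label : Prop := ∀ (list_sample : List (List (String × Int))), Dom_interleave_label list_sample → Pre_interleave_label list_sample → Spec_interleave_label list_sample (interleave_label list_sample)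

-- ===== LEMMAS AND PROOFS =====

-- Canonical interleaving of two lists (truncating at the shorter one).
def ilv {α : Type} : List α → List α → List α
  | a :: as, b :: bs => a :: b :: ilv as bs
  | _, _ => []

lemma ilv_length {α : Type} : ∀ (as bs : List α), as.length = bs.length →
    (ilv as bs).length = 2 * as.length
  | [], [], _ => rfl
  | a :: as, b :: bs, h => by
    simp [ilv, ilv_length as bs (by simpa using h)]; omega
  | [], _ :: _, h => by simp at h
  | _ :: _, [], h => by simp at h

lemma ilv_take_min {α : Type} : ∀ (g0 g1 : List α),
    ilv (g0.take (min g0.length g1.length)) (g1.take (min g0.length g1.length)) = ilv g0 g1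
  | [], g1 => by simp [ilv]
  | a :: as, [] => by simp [ilv]
  | a :: as, b :: bs => by
    simp only [List.length_cons, Nat.succ_min_succ, List.take_succ_cons, ilv]
    rw [ilv_take_min as bs]

lemma zip_flatMap_ilv {α : Type} : ∀ (g0 g1 : List α),
    (g0.zip g1).flatMap (fun p => [p.1, p.2]) = ilv g0 g1
  | [], g1 => by simp [ilv]
  | a :: as, [] => by simp [ilv]
  | a :: as, b :: bs => by
    simp [List.zip_cons_cons, ilv, zip_flatMap_ilv as bs]

lemma assignE {α : Type} : ∀ (as bs : List α) (b : α) (y : Option α) (rest : List (Option α)),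
    as.length = bs.length → 2 * as.length ≤ rest.length →
    assignEven (y :: assignEven rest as) (b :: bs)
      = some b :: (ilv as bs).map some ++ rest.drop (2 * as.length)
  | [], [], b, y, rest, _, _ => by
    cases rest with
    | nil => simp [assignEven, ilv]
    | cons r rs => simp [assignEven, ilv]
  | a :: as, b2 :: bs, b, y, rest, h, hlen => by
    match rest, hlen with
    | r1 :: r2 :: rest', hl =>
      have h' : as.length = bs.length := by simpa using h
      have hlen' : 2 * as.length ≤ rest'.length := by
        simp only [List.length_cons] at hl; omega
      simp only [assignEven, ilv]
      rw [assignE as bs b2 r2 rest' h' hlen']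
      rw [show 2 * ((a :: as).length) = 2 * as.length + 1 + 1 from by simp; ring,
        List.drop_succ_cons, List.drop_succ_cons]
      simp
  | [], _ :: _, _, _, _, h, _ => by simp at h
  | _ :: _, [], _, _, _, h, _ => by simp at h

lemma assignOE {α : Type} : ∀ (as bs : List α) (l : List (Option α)),
    as.length = bs.length → 2 * as.length ≤ l.length →
    assignOdd (assignEven l as) bs = (ilv as bs).map some ++ l.drop (2 * as.length)
  | [], [], l, _, _ => by cases l <;> simp [assignEven, assignOdd, ilv]
  | a :: as, b :: bs, l, h, hlen => by
    match l, hlen with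
    | x :: y :: rest, hl =>
      have h' : as.length = bs.length := by simpa using h
      have hlen' : 2 * as.length ≤ rest.length := by
        simp only [List.length_cons] at hl; omega
      simp only [assignEven, assignOdd, ilv]
      rw [assignE as bs b y rest h' hlen']
      rw [show 2 * ((a :: as).length) = 2 * as.length + 1 + 1 from by simp; ring,
        List.drop_succ_cons, List.drop_succ_cons]
      simp
  | [], _ :: _, _, h, _ => by simp at h
  | _ :: _, [], _, h, _ => by simp at h

lemma construct_eq (g0 g1 : List (List (String × Int))) :
    ((assignOdd (assignEven (List.replicate (g0.length + g1.length)
          (none : Option (List (String × Int)))) (g0.take (min g0.length g1.length)))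
        (g1.take (min g0.length g1.length))).take (2 * min g0.length g1.length)
      ++ (g0.drop (min g0.length g1.length) ++ g1.drop (min g0.length g1.length)).map some).map
        (fun o => o.getD [])
    = (g0.zip g1).foldl (fun acc p => acc ++ [p.1, p.2]) []
      ++ g0.drop (min g0.length g1.length) ++ g1.drop (min g0.length g1.length) := by
  set m := min g0.length g1.length with hm
  have h0 : (g0.take m).length = m := by simp [hm]
  have h1 : (g1.take m).length = m := by simp [hm]
  have hlen : 2 * (g0.take m).length ≤ (List.replicate (g0.length + g1.length)
      (none : Option (List (String × Int)))).length := by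
    simp [hm]; omega
  rw [assignOE _ _ _ (h0.trans h1.symm) hlen]
  have hilvlen : ((ilv (g0.take m) (g1.take m)).map some).length = 2 * m := by
    simp [ilv_length _ _ (h0.trans h1.symm), h0]
  rw [h0, List.take_append_of_le_length (le_of_eq hilvlen.symm), List.take_of_length_le (le_of_eq hilvlen)]
  rw [hm, ilv_take_min g0 g1]
  have hfold : (g0.zip g1).foldl (fun acc p => acc ++ [p.1, p.2]) []
      = (g0.zip g1).flatMap (fun p => [p.1, p.2]) := by
    simpa using PySem.List.foldl_append_eq_flatMap (fun p => [p.1, p.2]) (g0.zip g1) []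
  rw [hfold, zip_flatMap_ilv]
  simp [List.map_map, List.append_assoc]

-- ===== VERDICT (by name: the statement is the Claim_ definition above) =====
theorem interleave_label_spec : Claim_equal_interleave_label := by
  intro list_sample _ _
  unfold Spec_interleave_label interleave_label interleave_label_alt
  simp only []
  exact construct_eq (pvGroups list_sample).1 (pvGroups list_sample).2
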